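-- pv_equiv track=rewrite | github.com/momolaikankan/tsy1 | struc/zixulie.py | duzisort
-- ===== SOURCE A (Python) =====
-- def duzisort(str1, index, ans, path):
--     if index == len(str1):
--         if path not in ans:
--             ans.append(path)
--         return
--     yes = path + str1[index]
--     duzisort(str1, index + 1, ans, yes)
--     no = path
--     duzisort(str1, index + 1, ans, no)
--     return ans
-- ===== SOURCE B (Python) =====
-- def duzisort(str1, index, ans, path):
--     if index == len(str1):
--         if path not in ans:
--             ans.append(path)
--         return
--     m = len(str1) - index
--     for k in range(2 ** m):
--         s = path
--         for j in range(m):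
--             if ((k >> (m - 1 - j)) & 1) == 0:
--                 s = s + str1[index + j]
--         if s not in ans:
--             ans.append(s)
--     return ans
-- ===== Notes on version B (the rewrite author's own statement) =====
-- stated objective: alternative
-- what changed: The exponential include/exclude recursion is replaced by a single iterative loop over all 2^m bitmasks (m = len(str1) - index), building each subsequence from its mask in the same first-appearance order; no recursion at all.
-- outside the precondition, e.g. on duzisort('ab', 2, [], 'x'): A returns None, B returns None
import Mathlib
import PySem

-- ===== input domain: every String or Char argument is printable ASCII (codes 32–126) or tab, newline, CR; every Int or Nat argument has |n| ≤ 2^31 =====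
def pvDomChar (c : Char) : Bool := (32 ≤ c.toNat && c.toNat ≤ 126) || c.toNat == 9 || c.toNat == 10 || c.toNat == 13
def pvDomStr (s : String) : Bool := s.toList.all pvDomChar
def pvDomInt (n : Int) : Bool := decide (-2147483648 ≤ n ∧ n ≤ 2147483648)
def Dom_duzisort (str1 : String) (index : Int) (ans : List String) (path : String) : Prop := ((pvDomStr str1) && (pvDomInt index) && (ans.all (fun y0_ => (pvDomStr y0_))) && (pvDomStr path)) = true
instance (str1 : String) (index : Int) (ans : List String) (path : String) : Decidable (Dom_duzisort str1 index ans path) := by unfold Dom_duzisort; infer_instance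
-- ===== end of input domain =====

-- B replaces the include/exclude recursion by one iterative loop over all 2^m bitmasks (same order, same cost); equivalence is about the return value only (both mutate ans the same way in Python).


-- ===== PORT A =====
-- A's recursion: fuel = number of remaining positions (len - index); the fuel-0 case is
-- Python's 'index == len(str1)' base case; a failing str1[index] (IndexError) returns the
-- state unchanged — both situations lie outside Pre_duzisort.
def duzisortRec (str1 : String) (fuel : Nat) (index : Int) (ans : List String) (path : String) : List String :=
  match fuel with
  | 0 => if path ∈ ans then ans else ans ++ [path]
  | f + 1 =>
    match PySem.Str.pyGet? str1 index with
    | none => ans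
    | some c =>
      let yes := path.push c
      let ans1 := duzisortRec str1 f (index + 1) ans yes
      duzisortRec str1 f (index + 1) ans1 path

def duzisort (str1 : String) (index : Int) (ans : List String) (path : String) : List String :=
  if index = (str1.length : Int) then (if path ∈ ans then ans else ans ++ [path])
  else duzisortRec str1 ((str1.length : Int) - index).toNat index ans path

-- ===== PORT B =====
-- Source B's inner loop: build the candidate for bitmask k (bit 0 at position j = include str1[index+j]).
def buildMask (str1 : String) (index : Int) (m : Nat) (path : String) (k : Nat) : String :=
  (List.range m).foldl (fun s j =>
    if (k >>> (m - 1 - j)) &&& 1 == 0 then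
      match PySem.Str.pyGet? str1 (index + (j : Int)) with
      | some c => s.push c
      | none => s
    else s) path

def duzisort_alt (str1 : String) (index : Int) (ans : List String) (path : String) : List String :=
  if index = (str1.length : Int) then (if path ∈ ans then ans else ans ++ [path])
  else
    let m := ((str1.length : Int) - index).toNat
    (List.range (2 ^ m)).foldl (fun acc k =>
      let s := buildMask str1 index m path k
      if s ∈ acc then acc else acc ++ [s]) ans

-- ===== PRECONDITION & SPEC =====
-- Pre_ excludes index == len(str1), where Python A appends path to ans and returns None (not a
-- list), and index outside [-len, len), where str1[index] raises IndexError.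
def Pre_duzisort (str1 : String) (index : Int) (ans : List String) (path : String) : Prop :=
  -(str1.length : Int) ≤ index ∧ index < (str1.length : Int)
instance (str1 : String) (index : Int) (ans : List String) (path : String) : Decidable (Pre_duzisort str1 index ans path) := by unfold Pre_duzisort; infer_instance
def pvWitness_duzisort : String × Int × List String × String := ("ab", 0, [], "")

def Spec_duzisort (str1 : String) (index : Int) (ans : List String) (path : String) (out : List String) : Prop := out = duzisort_alt str1 index ans path
instance (str1 : String) (index : Int) (ans : List String) (path : String) (out : List String) : Decidable (Spec_duzisort str1 index ans path out) := by unfold Spec_duzisort; infer_instance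

-- ===== CLAIM (what is proved, stated in full; the proofs are below) =====
def Claim_equal_duzisort : Prop := ∀ (str1 : String) (index : Int) (ans : List String) (path : String), Dom_duzisort str1 index ans path → Pre_duzisort str1 index ans path → Spec_duzisort str1 index ans path (duzisort str1 index ans path)

-- ===== LEMMAS AND PROOFS =====

-- The DFS order of A: list of built strings in include-first order ([] where str1[index] fails).
def dfsList (str1 : String) (index : Int) (m : Nat) (path : String) : List String :=
  match m with
  | 0 => [path]
  | f + 1 =>
    match PySem.Str.pyGet? str1 index with
    | none => []
    | some c => dfsList str1 (index + 1) f (path.push c) ++ dfsList str1 (index + 1) f path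

theorem duzisortRec_eq_foldl_dfs (str1 : String) (f : Nat) :
    ∀ (index : Int) (ans : List String) (path : String),
      duzisortRec str1 f index ans path
        = (dfsList str1 index f path).foldl (fun acc s => if s ∈ acc then acc else acc ++ [s]) ans := by
  induction f with
  | zero => intro index ans path; simp [duzisortRec, dfsList]
  | succ f ih =>
    intro index ans path
    simp only [duzisortRec, dfsList]
    cases PySem.Str.pyGet? str1 index with
    | none => simp
    | some c => simp [ih, List.foldl_append]

theorem bit_add_pow (m s k : Nat) (hs : s < m) :
    ((2 ^ m + k) >>> s) &&& 1 = (k >>> s) &&& 1 := by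
  obtain ⟨t, ht⟩ : ∃ t, m = s + (t + 1) := ⟨m - s - 1, by omega⟩
  subst ht
  simp only [Nat.shiftRight_eq_div_pow, Nat.and_one_is_mod]
  rw [pow_add, Nat.mul_add_div (Nat.two_pow_pos s)]
  have h2 : 2 ^ (t + 1) = 2 * 2 ^ t := by ring
  omega

theorem buildMask_succ_lo (str1 : String) (index : Int) (m : Nat) (path : String) (c : Char)
    (hc : PySem.Str.pyGet? str1 index = some c) (k : Nat) (hk : k < 2 ^ m) :
    buildMask str1 index (m + 1) path k = buildMask str1 (index + 1) m (path.push c) k := by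
  unfold buildMask
  rw [List.range_succ_eq_map, List.foldl_cons, List.foldl_map]
  have h0 : (k >>> (m + 1 - 1 - 0)) &&& 1 == 0 := by
    simp [Nat.shiftRight_eq_div_pow, Nat.div_eq_of_lt hk]
  rw [if_pos h0]
  rw [show index + ((0 : Nat) : Int) = index by simp, hc]
  apply PySem.List.foldl_congr_mem
  intro s j hj
  have hjm : j < m := List.mem_range.mp hj
  have h1' : m + 1 - 1 - (j + 1) = m - 1 - j := by omega
  have h2 : index + ((j : Int) + 1) = index + 1 + (j : Int) := by ring
  simp only [Nat.succ_eq_add_one, Nat.cast_add, Nat.cast_one, h1', h2]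

theorem buildMask_succ_hi (str1 : String) (index : Int) (m : Nat) (path : String) (c : Char)
    (_hc : PySem.Str.pyGet? str1 index = some c) (k : Nat) (hk : k < 2 ^ m) :
    buildMask str1 index (m + 1) path (2 ^ m + k) = buildMask str1 (index + 1) m path k := by
  unfold buildMask
  rw [List.range_succ_eq_map, List.foldl_cons, List.foldl_map]
  have h0 : ¬ (((2 ^ m + k) >>> (m + 1 - 1 - 0)) &&& 1 == 0) := by
    have : (2 ^ m + k) / 2 ^ m = 1 := by
      rw [Nat.add_comm, Nat.add_div_right _ (Nat.two_pow_pos m), Nat.div_eq_of_lt hk]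
    simp [Nat.shiftRight_eq_div_pow, this]
  rw [if_neg h0]
  apply PySem.List.foldl_congr_mem
  intro s j hj
  have hjm : j < m := List.mem_range.mp hj
  have h1' : m + 1 - 1 - (j + 1) = m - 1 - j := by omega
  have hb : ((2 ^ m + k) >>> (m - 1 - j)) &&& 1 = (k >>> (m - 1 - j)) &&& 1 :=
    bit_add_pow m (m - 1 - j) k (by omega)
  have h2 : index + ((j : Int) + 1) = index + 1 + (j : Int) := by ring
  simp only [Nat.succ_eq_add_one, Nat.cast_add, Nat.cast_one, h1', hb, h2]

theorem map_buildMask_eq_dfs (str1 : String) (m : Nat) :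
    ∀ (index : Int) (path : String),
      (∀ j : Nat, j < m → (PySem.Str.pyGet? str1 (index + (j : Int))).isSome) →
      (List.range (2 ^ m)).map (buildMask str1 index m path) = dfsList str1 index m path := by
  induction m with
  | zero => intro index path _; simp [buildMask, dfsList]
  | succ m ih =>
    intro index path h
    have h0 := h 0 (by omega)
    rw [show index + ((0 : Nat) : Int) = index by simp] at h0
    obtain ⟨c, hc⟩ := Option.isSome_iff_exists.mp h0
    have hrest : ∀ j : Nat, j < m → (PySem.Str.pyGet? str1 (index + 1 + (j : Int))).isSome := by
      intro j hj
      have := h (j + 1) (by omega)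
      rwa [show index + (((j : Nat) + 1 : Nat) : Int) = index + 1 + (j : Int) by push_cast; ring] at this
    have hsplit : 2 ^ (m + 1) = 2 ^ m + 2 ^ m := by ring
    rw [hsplit, List.range_add, List.map_append, List.map_map]
    have hlo : (List.range (2 ^ m)).map (buildMask str1 index (m + 1) path)
        = (List.range (2 ^ m)).map (buildMask str1 (index + 1) m (path.push c)) := by
      apply List.map_congr_left
      intro k hk
      exact buildMask_succ_lo str1 index m path c hc k (List.mem_range.mp hk)
    have hhi : (List.range (2 ^ m)).map (buildMask str1 index (m + 1) path ∘ (fun k => 2 ^ m + k))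
        = (List.range (2 ^ m)).map (buildMask str1 (index + 1) m path) := by
      apply List.map_congr_left
      intro k hk
      exact buildMask_succ_hi str1 index m path c hc k (List.mem_range.mp hk)
    rw [hlo, hhi, ih (index + 1) (path.push c) hrest, ih (index + 1) path hrest]
    conv_rhs => rw [dfsList]
    rw [hc]

-- ===== VERDICT (by name: the statement is the Claim_ definition above) =====
theorem duzisort_spec : Claim_equal_duzisort := by
  intro str1 index ans path _hDom hPre
  obtain ⟨hlo, hhi⟩ := hPre
  unfold Spec_duzisort duzisort duzisort_alt
  have hne : ¬ index = (str1.length : Int) := by omega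
  rw [if_neg hne, if_neg hne]
  set m := ((str1.length : Int) - index).toNat with hm
  have hmi : (m : Int) = (str1.length : Int) - index := by omega
  have hsome : ∀ j : Nat, j < m → (PySem.Str.pyGet? str1 (index + (j : Int))).isSome := by
    intro j hj
    have hji : (j : Int) < (m : Int) := by exact_mod_cast hj
    simp only [PySem.Str.pyGet?_eq, PySem.Chars.pyGet?_eq_listPyGet?]
    rw [Option.isSome_iff_ne_none]
    intro hnone
    rw [PySem.List.pyGet?_eq_none_iff] at hnone
    apply hnone
    unfold PySem.Raise.InRange
    constructor <;> [skip; skip] <;> simp only [String.length] at * <;> omega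
  rw [duzisortRec_eq_foldl_dfs, ← map_buildMask_eq_dfs str1 m index path hsome, List.foldl_map]
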